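-- pv_equiv track=rewrite | github.com/afifhrz/side-hustle | YuanittoValent_FamilyTree/Exam/cooking_ingredients.py | get_dishes
-- ===== SOURCE A (Python) =====
-- def get_dishes(cook_string):
--
--     cook_dict = {
--         'P':[2,1,1,1],
--         'D':[2,2,2,2],
--         'C':[1,3,0,0],
--     }
--
--     #check how many dishes
--     number_of_dishes = 0
--     index_store = []
--     code_dish = []
--     for index, letter in enumerate(cook_string):
--         if letter == 'P' or letter == 'D' or letter == 'C':
--             number_of_dishes += 1
--             code_dish.append(letter)
--             index_store.append(index)
--
--     #store the composition
--     dish_composition = []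
--     for dish in range(number_of_dishes):
--         if dish == 0:
--             dish_composition.append(cook_string[0:index_store[0]])
--         else:
--             dish_composition.append(cook_string[index_store[dish-1]+1:index_store[dish]])
--
--     #convert the composisition
--     dish_dict = []
--     for dish in range(number_of_dishes):
--         eggs = 0
--         milks = 0
--         flour = 0
--         sugar = 0
--         for letter in dish_composition[dish]:
--             if letter == 'E':
--                 eggs += 1
--             elif letter == 'M':
--                 milks += 1
--             elif letter == 'F':
--                 flour += 1
--             elif letter == 'S':
--                 sugar += 1
--         dish_dict.append([eggs,milks,flour,sugar])
--
--     #check the dish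
--     result = [0]*4
--     for dish in range(number_of_dishes):
--         value = True
--         for index, recipe in enumerate(dish_dict[dish]):
--             if cook_dict[code_dish[dish]][index] > dish_dict[dish][index]:
--                 value = False
--         if value:
--             if code_dish[dish] == 'P':
--                 result[0]+=1
--             elif code_dish[dish] == 'D':
--                 result[1]+=1
--             if code_dish[dish] == 'C':
--                 result[2]+=1
--         else:
--             result[3]+=1
--
--     return result
-- ===== SOURCE B (Python) =====
-- def get_dishes(cook_string):
--     need = {'P': (2, 1, 1, 1), 'D': (2, 2, 2, 2), 'C': (1, 3, 0, 0)}
--     slot = {'P': 0, 'D': 1, 'C': 2}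
--     result = [0, 0, 0, 0]
--     e = m = f = s = 0
--     for ch in cook_string:
--         if ch == 'E':
--             e += 1
--         elif ch == 'M':
--             m += 1
--         elif ch == 'F':
--             f += 1
--         elif ch == 'S':
--             s += 1
--         elif ch in need:
--             ne, nm, nf, ns = need[ch]
--             ok = ne <= e and nm <= m and nf <= f and ns <= s
--             result[slot[ch] if ok else 3] += 1
--             e = m = f = s = 0
--     return result
-- ===== Notes on version B (the rewrite author's own statement) =====
-- stated objective: simpler
-- what changed: A makes four index-based passes (collect marker positions, slice the string between consecutive markers, count each slice, judge each slice); B is one streaming pass that keeps a running ingredient accumulator and judges/resets it at each marker.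
import Mathlib
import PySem

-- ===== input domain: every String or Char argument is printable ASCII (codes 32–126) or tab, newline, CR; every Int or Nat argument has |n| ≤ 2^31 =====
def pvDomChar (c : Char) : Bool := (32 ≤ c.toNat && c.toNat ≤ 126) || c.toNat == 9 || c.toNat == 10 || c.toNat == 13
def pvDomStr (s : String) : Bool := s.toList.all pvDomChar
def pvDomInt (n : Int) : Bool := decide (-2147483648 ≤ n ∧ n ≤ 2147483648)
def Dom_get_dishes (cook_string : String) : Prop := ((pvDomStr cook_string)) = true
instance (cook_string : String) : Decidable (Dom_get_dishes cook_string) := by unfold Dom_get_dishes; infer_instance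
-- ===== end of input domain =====

-- B replaces A's four index-based passes (collect marker positions, slice the string
-- between consecutive markers, count each slice, then judge each slice) by ONE streaming
-- pass that keeps a running ingredient accumulator and judges/resets it at each marker.

-- ===== PORT A =====
def gdCookDict (c : Char) : List Int :=
  if c = 'P' then [2, 1, 1, 1]
  else if c = 'D' then [2, 2, 2, 2]
  else if c = 'C' then [1, 3, 0, 0]
  else []   -- unreachable: looked up only at marker letters

def gdStep1 (st : Int × List Int × List Char) (p : Int × Char) : Int × List Int × List Char :=
  if p.2 = 'P' ∨ p.2 = 'D' ∨ p.2 = 'C' then (st.1 + 1, st.2.1 ++ [p.1], st.2.2 ++ [p.2]) else st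

def gdLoop1 (cs : List Char) : Int × List Int × List Char :=
  (PySem.List.enumerate cs).foldl gdStep1 (0, [], [])

def gdComp (cs : List Char) (idx : List Int) (dish : Int) : List Char :=
  if dish = 0 then PySem.List.slice cs (some 0) (some (PySem.List.pyGetD idx 0 0))
  else PySem.List.slice cs (some (PySem.List.pyGetD idx (dish - 1) 0 + 1))
         (some (PySem.List.pyGetD idx dish 0))

def gdLoop2 (cs : List Char) (idx : List Int) (n : Int) : List (List Char) :=
  (PySem.List.pyRange 0 n 1).foldl (fun acc dish => acc ++ [gdComp cs idx dish]) []

def gdCntStep (st : Int × Int × Int × Int) (c : Char) : Int × Int × Int × Int :=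
  if c = 'E' then (st.1 + 1, st.2.1, st.2.2.1, st.2.2.2)
  else if c = 'M' then (st.1, st.2.1 + 1, st.2.2.1, st.2.2.2)
  else if c = 'F' then (st.1, st.2.1, st.2.2.1 + 1, st.2.2.2)
  else if c = 'S' then (st.1, st.2.1, st.2.2.1, st.2.2.2 + 1)
  else st

def gdCount (seg : List Char) : List Int :=
  let f := seg.foldl gdCntStep (0, 0, 0, 0)
  [f.1, f.2.1, f.2.2.1, f.2.2.2]

def gdLoop3 (comps : List (List Char)) (n : Int) : List (List Int) :=
  (PySem.List.pyRange 0 n 1).foldl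
    (fun acc dish => acc ++ [gdCount (PySem.List.pyGetD comps dish [])]) []

def gdBump (r : List Int) (i : Nat) : List Int := r.set i (r.getD i 0 + 1)

def gdStep4 (codes : List Char) (dd : List (List Int)) (result : List Int) (dish : Int) : List Int :=
  let code := PySem.List.pyGetD codes dish ' '
  let recipe := PySem.List.pyGetD dd dish []
  let value := (PySem.List.enumerate recipe).foldl
    (fun v p =>
      if PySem.List.pyGetD (gdCookDict code) p.1 0 > PySem.List.pyGetD recipe p.1 0 then false
      else v) true
  if value then
    let r1 := if code = 'P' then gdBump result 0
              else if code = 'D' then gdBump result 1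
              else result
    if code = 'C' then gdBump r1 2 else r1
  else gdBump result 3

def gdLoop4 (codes : List Char) (dd : List (List Int)) (n : Int) : List Int :=
  (PySem.List.pyRange 0 n 1).foldl (gdStep4 codes dd) [0, 0, 0, 0]

def get_dishes (cook_string : String) : List Int :=
  let cs := cook_string.toList
  let t := gdLoop1 cs
  gdLoop4 t.2.2 (gdLoop3 (gdLoop2 cs t.2.1 t.1) t.1) t.1

-- ===== PORT B =====
def altBump (r : List Int) (i : Nat) : List Int := r.set i (r.getD i 0 + 1)

def altNeed (ch : Char) : Option (Int × Int × Int × Int) :=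
  if ch = 'P' then some (2, 1, 1, 1)
  else if ch = 'D' then some (2, 2, 2, 2)
  else if ch = 'C' then some (1, 3, 0, 0)
  else none

def altSlot (ch : Char) : Nat := if ch = 'P' then 0 else if ch = 'D' then 1 else 2

def altStep (st : (Int × Int × Int × Int) × List Int) (ch : Char) :
    (Int × Int × Int × Int) × List Int :=
  if ch = 'E' then ((st.1.1 + 1, st.1.2.1, st.1.2.2.1, st.1.2.2.2), st.2)
  else if ch = 'M' then ((st.1.1, st.1.2.1 + 1, st.1.2.2.1, st.1.2.2.2), st.2)
  else if ch = 'F' then ((st.1.1, st.1.2.1, st.1.2.2.1 + 1, st.1.2.2.2), st.2)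
  else if ch = 'S' then ((st.1.1, st.1.2.1, st.1.2.2.1, st.1.2.2.2 + 1), st.2)
  else
    match altNeed ch with
    | some q =>
        let ok := q.1 ≤ st.1.1 ∧ q.2.1 ≤ st.1.2.1 ∧ q.2.2.1 ≤ st.1.2.2.1 ∧ q.2.2.2 ≤ st.1.2.2.2
        ((0, 0, 0, 0), altBump st.2 (if ok then altSlot ch else 3))
    | none => st

def get_dishes_alt (cook_string : String) : List Int :=
  (cook_string.toList.foldl altStep ((0, 0, 0, 0), [0, 0, 0, 0])).2

-- ===== PRECONDITION & SPEC =====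
def Spec_get_dishes (cook_string : String) (out : List Int) : Prop := out = get_dishes_alt cook_string
instance (cook_string : String) (out : List Int) : Decidable (Spec_get_dishes cook_string out) := by unfold Spec_get_dishes; infer_instance

-- ===== CLAIM (what is proved, stated in full; the proofs are below) =====
def Claim_equal_get_dishes : Prop := ∀ (cook_string : String), Dom_get_dishes cook_string → Spec_get_dishes cook_string (get_dishes cook_string)

-- ===== LEMMAS AND PROOFS =====

def isMk (c : Char) : Bool := c == 'P' || c == 'D' || c == 'C'

def mIdx : List Char → Int → List Int
  | [], _ => []
  | c :: t, s => if isMk c then s :: mIdx t (s + 1) else mIdx t (s + 1)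

def mCodes (cs : List Char) : List Char := cs.filter isMk

-- the list of (marker, ingredient counts of the stretch before it) pairs, in order
def dishes : List Char → Int × Int × Int × Int → List (Char × (Int × Int × Int × Int))
  | [], _ => []
  | c :: t, a => if isMk c then (c, a) :: dishes t (0, 0, 0, 0) else dishes t (gdCntStep a c)

def okFor (c : Char) (a : Int × Int × Int × Int) : Bool :=
  match altNeed c with
  | some q => decide (q.1 ≤ a.1 ∧ q.2.1 ≤ a.2.1 ∧ q.2.2.1 ≤ a.2.2.1 ∧ q.2.2.2 ≤ a.2.2.2)
  | none => true

def tallyStep (r : List Int) (p : Char × (Int × Int × Int × Int)) : List Int :=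
  if okFor p.1 p.2 then gdBump r (altSlot p.1) else gdBump r 3

def toL (a : Int × Int × Int × Int) : List Int := [a.1, a.2.1, a.2.2.1, a.2.2.2]

def gdLoop4From (codes : List Char) (dd : List (List Int)) (r : List Int) (n : Int) : List Int :=
  (PySem.List.pyRange 0 n 1).foldl (gdStep4 codes dd) r

theorem dishes_no_marker (cs : List Char) (a : Int × Int × Int × Int)
    (h : mCodes cs = []) : dishes cs a = [] := by
  induction cs generalizing a with
  | nil => rfl
  | cons c t ih =>
    by_cases hc : isMk c
    · simp only [mCodes, List.filter_cons, hc, if_true] at h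
      exact absurd h (List.cons_ne_nil _ _)
    · have hc' : isMk c = false := by simpa using hc
      simp only [mCodes, List.filter_cons, hc', Bool.false_eq_true, if_false] at h
      simp [dishes, hc', ih _ h]

theorem split_of_marker (cs : List Char) (h : mCodes cs ≠ []) :
    ∃ pre m rest, cs = pre ++ m :: rest ∧ mCodes pre = [] ∧ isMk m = true := by
  induction cs with
  | nil => simp [mCodes] at h
  | cons c t ih =>
    by_cases hc : isMk c
    · exact ⟨[], c, t, rfl, rfl, hc⟩
    · have hc' : isMk c = false := by simpa using hc
      have h' : mCodes t ≠ [] := by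
        simpa only [mCodes, List.filter_cons, hc', Bool.false_eq_true, if_false] using h
      obtain ⟨pre, m, rest, h1, h2, h3⟩ := ih h'
      refine ⟨c :: pre, m, rest, by simp [h1], ?_, h3⟩
      simp only [mCodes, List.filter_cons, hc', Bool.false_eq_true, if_false]
      exact h2

theorem mCodes_split (pre rest : List Char) (m : Char) (hpre : mCodes pre = [])
    (hm : isMk m = true) : mCodes (pre ++ m :: rest) = m :: mCodes rest := by
  have h : pre.filter isMk = [] := hpre
  simp only [mCodes, List.filter_append, List.filter_cons, hm, if_true, h, List.nil_append]

theorem mIdx_split (pre rest : List Char) (m : Char) (hpre : mCodes pre = [])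
    (hm : isMk m = true) (s : Int) :
    mIdx (pre ++ m :: rest) s = (s + pre.length) :: mIdx rest (s + pre.length + 1) := by
  induction pre generalizing s with
  | nil => simp [mIdx, hm]
  | cons c p ih =>
    have hc : isMk c = false := by
      by_cases h : isMk c
      · simp only [mCodes, List.filter_cons, h, if_true] at hpre
        exact absurd hpre (List.cons_ne_nil _ _)
      · simpa using h
    have hp : mCodes p = [] := by
      simpa only [mCodes, List.filter_cons, hc, Bool.false_eq_true, if_false] using hpre
    simp only [List.cons_append, mIdx, hc, Bool.false_eq_true, if_false, ih hp, List.length_cons]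
    congr 1
    · push_cast; ring
    · congr 1; push_cast; ring

theorem mIdx_shift (cs : List Char) (s : Int) :
    mIdx cs s = (mIdx cs 0).map (· + s) := by
  induction cs generalizing s with
  | nil => simp [mIdx]
  | cons c t ih =>
    by_cases hc : isMk c
    · simp only [mIdx, hc, if_true, List.map_cons, zero_add]
      rw [ih (s + 1), ih 1, List.map_map]
      congr 1
      apply List.map_congr_left
      intro x _
      simp only [Function.comp_apply]
      ring
    · simp only [mIdx, hc, Bool.false_eq_true, if_false, zero_add]
      rw [ih (s + 1), ih 1, List.map_map]
      apply List.map_congr_left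
      intro x _
      simp only [Function.comp_apply]
      ring

theorem mIdx_nonneg (cs : List Char) (s : Int) (x : Int) (hx : x ∈ mIdx cs s) : s ≤ x := by
  induction cs generalizing s with
  | nil => simp [mIdx] at hx
  | cons c t ih =>
    by_cases hc : isMk c <;> simp [mIdx, hc] at hx
    · rcases hx with rfl | hx
      · omega
      · have := ih (s + 1) hx; omega
    · have := ih (s + 1) hx; omega

theorem mIdx_length (cs : List Char) (s : Int) : (mIdx cs s).length = (mCodes cs).length := by
  induction cs generalizing s with
  | nil => rfl
  | cons c t ih =>
    by_cases hc : isMk c <;> simp [mIdx, mCodes, hc, ih]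

theorem isMk_iff (c : Char) : isMk c = true ↔ (c = 'P' ∨ c = 'D' ∨ c = 'C') := by
  simp [isMk, or_assoc]

theorem gdLoop1_gen (cs : List Char) : ∀ (s n : Int) (I : List Int) (C : List Char),
    (PySem.List.enumerate cs s).foldl gdStep1 (n, I, C)
      = (n + (mCodes cs).length, I ++ mIdx cs s, C ++ mCodes cs) := by
  induction cs with
  | nil => intro s n I C; simp [PySem.List.enumerate_nil, mCodes, mIdx]
  | cons c t ih =>
    intro s n I C
    rw [PySem.List.enumerate_cons, List.foldl_cons]
    by_cases hc : isMk c
    · have hc' : c = 'P' ∨ c = 'D' ∨ c = 'C' := (isMk_iff c).mp hc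
      have : gdStep1 (n, I, C) (s, c) = (n + 1, I ++ [s], C ++ [c]) := by
        simp [gdStep1, hc']
      rw [this, ih]
      simp only [mCodes, mIdx, List.filter_cons, hc, if_true, Prod.mk.injEq,
        List.length_cons, List.append_assoc, List.singleton_append]
      exact ⟨by push_cast; ring, trivial⟩

    · have hc' : ¬(c = 'P' ∨ c = 'D' ∨ c = 'C') := by
        intro h; exact absurd ((isMk_iff c).mpr h) (by simpa using hc)
      have hc0 : isMk c = false := by simpa using hc
      have : gdStep1 (n, I, C) (s, c) = (n, I, C) := by simp [gdStep1, hc']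
      rw [this, ih]
      simp only [mCodes, mIdx, List.filter_cons, hc0, Bool.false_eq_true, if_false]

theorem gdLoop1_eq (cs : List Char) :
    gdLoop1 cs = (((mCodes cs).length : Int), mIdx cs 0, mCodes cs) := by
  unfold gdLoop1
  rw [gdLoop1_gen cs 0 0 [] []]
  simp

theorem pyRange_zero_succ_map {α : Type} (f : Int → α) (n : Nat) :
    (PySem.List.pyRange 0 ((n : Int) + 1) 1).map f
      = f 0 :: (List.range n).map (fun (k : Nat) => f ((k : Int) + 1)) := by
  have h : ((n : Int) + 1) = ((n + 1 : Nat) : Int) := by push_cast; ring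
  rw [h, PySem.List.pyRange_zero_natCast, List.range_succ_eq_map]
  simp only [List.map_cons, List.map_map, Nat.cast_zero]
  congr 1

theorem pyRange_zero_map {α : Type} (f : Int → α) (n : Nat) :
    (PySem.List.pyRange 0 (n : Int) 1).map f = (List.range n).map (fun (k : Nat) => f (k : Int)) := by
  rw [PySem.List.pyRange_zero_natCast, List.map_map]
  rfl

theorem pyRange_zero_succ_foldl {β : Type} (g : β → Int → β) (n : Nat) (b : β) :
    (PySem.List.pyRange 0 ((n : Int) + 1) 1).foldl g b
      = (List.range n).foldl (fun (r : β) (k : Nat) => g r ((k : Int) + 1)) (g b 0) := by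
  have h : ((n : Int) + 1) = ((n + 1 : Nat) : Int) := by push_cast; ring
  rw [h, PySem.List.pyRange_zero_natCast, List.range_succ_eq_map]
  simp only [List.map_cons, List.foldl_cons, List.map_map, List.foldl_map, Nat.cast_zero]
  rfl

theorem pyRange_zero_foldl {β : Type} (g : β → Int → β) (n : Nat) (b : β) :
    (PySem.List.pyRange 0 (n : Int) 1).foldl g b
      = (List.range n).foldl (fun (r : β) (k : Nat) => g r (k : Int)) b := by
  rw [PySem.List.pyRange_zero_natCast, List.foldl_map]

theorem slice_shift {α : Type} (pre : List α) (x : α) (rest : List α) (a b : Int)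
    (ha : 0 ≤ a) (hb : 0 ≤ b) :
    PySem.List.slice (pre ++ x :: rest) (some ((pre.length : Int) + 1 + a))
        (some ((pre.length : Int) + 1 + b))
      = PySem.List.slice rest (some a) (some b) := by
  rw [PySem.List.slice_toNat _ (by omega) (by omega), PySem.List.slice_toNat _ ha hb]
  have h1 : ((pre.length : Int) + 1 + a).toNat = pre.length + 1 + a.toNat := by omega
  have h2 : ((pre.length : Int) + 1 + b).toNat - ((pre.length : Int) + 1 + a).toNat
      = b.toNat - a.toNat := by omega
  rw [h2, h1]
  congr 1
  rw [List.drop_append]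
  have h3 : pre.length + 1 + a.toNat - pre.length = a.toNat + 1 := by omega
  rw [List.drop_eq_nil_of_le (by omega), h3]
  simp

theorem gdLoop2_eq_map (cs : List Char) (idx : List Int) (n : Int) :
    gdLoop2 cs idx n = (PySem.List.pyRange 0 n 1).map (gdComp cs idx) := by
  unfold gdLoop2
  rw [PySem.List.foldl_append_singleton_eq_map]
  simp

theorem gdLoop2_length (cs : List Char) (idx : List Int) (n : Nat) :
    (gdLoop2 cs idx (n : Int)).length = n := by
  rw [gdLoop2_eq_map, pyRange_zero_map]
  simp

theorem pyGetD_cons_succ_nat {α : Type} (x : α) (xs : List α) (j : Nat) (d : α) :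
    PySem.List.pyGetD (x :: xs) ((j : Int) + 1) d = PySem.List.pyGetD xs (j : Int) d := by
  have h : ((j : Int) + 1) = (((j + 1 : Nat)) : Int) := by push_cast; ring
  rw [h, PySem.List.pyGetD_natCast, PySem.List.pyGetD_natCast, List.getD_cons_succ]

theorem gdLoop2_split (pre rest : List Char) (m : Char) (hpre : mCodes pre = [])
    (hm : isMk m = true) :
    gdLoop2 (pre ++ m :: rest) (mIdx (pre ++ m :: rest) 0) ((mCodes (pre ++ m :: rest)).length : Int)
      = pre :: gdLoop2 rest (mIdx rest 0) ((mCodes rest).length : Int) := by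
  have hidx : mIdx (pre ++ m :: rest) 0
      = (pre.length : Int) :: (mIdx rest 0).map (· + ((pre.length : Int) + 1)) := by
    rw [mIdx_split pre rest m hpre hm 0]
    rw [mIdx_shift rest (0 + pre.length + 1)]
    congr 1
    · omega
    · congr 1
      funext x
      ring
  rw [mCodes_split pre rest m hpre hm, hidx]
  rw [gdLoop2_eq_map, gdLoop2_eq_map]
  have hn : ((m :: mCodes rest).length : Int) = (((mCodes rest).length : Nat) : Int) + 1 := by
    rw [List.length_cons]; push_cast; ring
  rw [hn, pyRange_zero_succ_map, pyRange_zero_map]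
  have hlen : (mIdx rest 0).length = (mCodes rest).length := mIdx_length rest 0
  congr 1
  · -- head: slice cs 0 pre.length = pre
    have hL : gdComp (pre ++ m :: rest) ((pre.length : Int) :: (mIdx rest 0).map (· + ((pre.length : Int) + 1))) 0
        = PySem.List.slice (pre ++ m :: rest) (some 0) (some ((pre.length : Int))) := by
      norm_num [gdComp, PySem.List.pyGetD_zero_cons]
    rw [hL, PySem.List.slice_zero_start, PySem.List.slice_to_natCast]
    exact List.take_left
  · -- tail
    apply List.map_congr_left
    intro k hk
    have hk' : k < (mIdx rest 0).length := by rw [hlen]; exact List.mem_range.mp hk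
    have hnn : ∀ y ∈ mIdx rest 0, 0 ≤ y := fun y hy => mIdx_nonneg rest 0 y hy
    set idx' := mIdx rest 0 with hidx'
    have hmapget : ∀ (j : Nat), j < idx'.length →
        (idx'.map (· + ((pre.length : Int) + 1))).getD j 0 = idx'.getD j 0 + ((pre.length : Int) + 1) := by
      intro j hj
      rw [List.getD_eq_getElem _ _ (by simpa using hj), List.getElem_map,
        List.getD_eq_getElem _ _ hj]
    have hgetnn : ∀ (j : Nat), j < idx'.length → 0 ≤ idx'.getD j 0 := by
      intro j hj
      rw [List.getD_eq_getElem _ _ hj]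
      exact hnn _ (List.getElem_mem hj)
    rcases Nat.eq_zero_or_pos k with hk0 | hkpos
    · subst hk0
      have hL : gdComp (pre ++ m :: rest) ((pre.length : Int) :: idx'.map (· + ((pre.length : Int) + 1))) (((0 : Nat) : Int) + 1)
          = PySem.List.slice (pre ++ m :: rest)
              (some (PySem.List.pyGetD ((pre.length : Int) :: idx'.map (· + ((pre.length : Int) + 1))) (((0 : Nat) : Int) + 1 - 1) 0 + 1))
              (some (PySem.List.pyGetD ((pre.length : Int) :: idx'.map (· + ((pre.length : Int) + 1))) (((0 : Nat) : Int) + 1) 0)) := by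
        rw [gdComp, if_neg (by omega)]
      have hR : gdComp rest idx' ((0 : Nat) : Int)
          = PySem.List.slice rest (some 0) (some (PySem.List.pyGetD idx' 0 0)) := by
        rw [gdComp, if_pos (by norm_num)]
      rw [hL, hR]
      have i1 : (((0 : Nat) : Int) + 1 - 1) = ((0 : Nat) : Int) := by ring
      rw [i1, pyGetD_cons_succ_nat, PySem.List.pyGetD_natCast, PySem.List.pyGetD_natCast,
        hmapget 0 hk']
      have e2 : PySem.List.pyGetD idx' 0 0 = idx'.getD 0 0 := PySem.List.pyGetD_zero _ _
      rw [e2]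
      rw [show ((pre.length : Int) :: idx'.map (· + ((pre.length : Int) + 1))).getD 0 0 = (pre.length : Int) from rfl]
      have hb0 : (0 : Int) ≤ idx'.getD 0 0 := hgetnn 0 hk'
      calc PySem.List.slice (pre ++ m :: rest) (some ((pre.length : Int) + 1)) (some (idx'.getD 0 0 + ((pre.length : Int) + 1)))
          = PySem.List.slice (pre ++ m :: rest) (some ((pre.length : Int) + 1 + 0)) (some ((pre.length : Int) + 1 + idx'.getD 0 0)) := by
            congr 2 <;> ring
        _ = PySem.List.slice rest (some 0) (some (idx'.getD 0 0)) := slice_shift pre m rest 0 _ le_rfl hb0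
    · have hk1 : k - 1 < idx'.length := by omega
      have hL : gdComp (pre ++ m :: rest) ((pre.length : Int) :: idx'.map (· + ((pre.length : Int) + 1))) ((k : Int) + 1)
          = PySem.List.slice (pre ++ m :: rest)
              (some (PySem.List.pyGetD ((pre.length : Int) :: idx'.map (· + ((pre.length : Int) + 1))) ((k : Int) + 1 - 1) 0 + 1))
              (some (PySem.List.pyGetD ((pre.length : Int) :: idx'.map (· + ((pre.length : Int) + 1))) ((k : Int) + 1) 0)) := by
        rw [gdComp, if_neg (by omega)]
      have hR : gdComp rest idx' (k : Int)
          = PySem.List.slice rest (some (PySem.List.pyGetD idx' ((k : Int) - 1) 0 + 1))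
              (some (PySem.List.pyGetD idx' (k : Int) 0)) := by
        rw [gdComp, if_neg (by omega)]
      rw [hL, hR]
      have e1 : PySem.List.pyGetD ((pre.length : Int) :: idx'.map (· + ((pre.length : Int) + 1))) ((k : Int) + 1 - 1) 0
          = idx'.getD (k - 1) 0 + ((pre.length : Int) + 1) := by
        have h' : ((k : Int) + 1 - 1) = ((k : Nat) : Int) := by ring
        rw [h', PySem.List.pyGetD_natCast]
        rcases k with _ | k0
        · omega
        · rw [List.getD_cons_succ, hmapget k0 (by omega)]
          congr 1
      have e2 : PySem.List.pyGetD ((pre.length : Int) :: idx'.map (· + ((pre.length : Int) + 1))) ((k : Int) + 1) 0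
          = idx'.getD k 0 + ((pre.length : Int) + 1) := by
        rw [pyGetD_cons_succ_nat, PySem.List.pyGetD_natCast, hmapget k hk']
      have e3 : PySem.List.pyGetD idx' ((k : Int) - 1) 0 = idx'.getD (k - 1) 0 := by
        have : ((k : Int) - 1) = (((k - 1 : Nat)) : Int) := by omega
        rw [this, PySem.List.pyGetD_natCast]
      have e4 : PySem.List.pyGetD idx' (k : Int) 0 = idx'.getD k 0 := by
        rw [PySem.List.pyGetD_natCast]
      rw [e1, e2, e3, e4]
      have ha : (0 : Int) ≤ idx'.getD (k - 1) 0 + 1 := by have := hgetnn (k - 1) hk1; omega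
      have hb : (0 : Int) ≤ idx'.getD k 0 := hgetnn k hk'
      calc PySem.List.slice (pre ++ m :: rest) (some (idx'.getD (k - 1) 0 + ((pre.length : Int) + 1) + 1)) (some (idx'.getD k 0 + ((pre.length : Int) + 1)))
          = PySem.List.slice (pre ++ m :: rest) (some ((pre.length : Int) + 1 + (idx'.getD (k - 1) 0 + 1))) (some ((pre.length : Int) + 1 + idx'.getD k 0)) := by
            congr 2 <;> ring
        _ = PySem.List.slice rest (some (idx'.getD (k - 1) 0 + 1)) (some (idx'.getD k 0)) := slice_shift pre m rest _ _ ha hb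

theorem gdLoop3_eq_map (comps : List (List Char)) :
    gdLoop3 comps (comps.length : Int) = comps.map gdCount := by
  unfold gdLoop3
  rw [PySem.List.foldl_append_singleton_eq_map]
  have h := PySem.List.map_pyGetD_pyRange_zero (xs := comps) (d := ([] : List Char))
  rw [show (fun dish => gdCount (PySem.List.pyGetD comps dish []))
      = gdCount ∘ (fun j => PySem.List.pyGetD comps j []) from rfl]
  rw [← List.map_map]
  simp only [PySem.List.len_eq] at h
  rw [h]
  simp

theorem pyGetD4_1 (w x y z d : Int) : PySem.List.pyGetD [w, x, y, z] 1 d = x := rfl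
theorem pyGetD4_2 (w x y z d : Int) : PySem.List.pyGetD [w, x, y, z] 2 d = y := rfl
theorem pyGetD4_3 (w x y z d : Int) : PySem.List.pyGetD [w, x, y, z] 3 d = z := rfl

theorem gdCount_eq_toL (seg : List Char) :
    gdCount seg = toL (seg.foldl gdCntStep (0, 0, 0, 0)) := rfl

theorem gdStep4_head (c : Char) (hm : isMk c = true) (a : Int × Int × Int × Int)
    (codes : List Char) (dd : List (List Int)) (r : List Int) :
    gdStep4 (c :: codes) (toL a :: dd) r 0 = tallyStep r (c, a) := by
  rcases (isMk_iff c).mp hm with rfl | rfl | rfl <;>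
    (simp [gdStep4, tallyStep, okFor, altNeed, altSlot, toL, gdCookDict,
      PySem.List.enumerate_cons, PySem.List.enumerate_nil,
      pyGetD4_1, pyGetD4_2, pyGetD4_3, PySem.List.pyGetD_zero_cons]
     split_ifs <;> first | rfl | omega)

theorem gdStep4_shift (c : Char) (codes : List Char) (d0 : List Int) (dd : List (List Int))
    (r : List Int) (k : Nat) :
    gdStep4 (c :: codes) (d0 :: dd) r ((k : Int) + 1) = gdStep4 codes dd r (k : Int) := by
  unfold gdStep4
  have h : ((k : Int) + 1) = (((k + 1 : Nat)) : Int) := by push_cast; ring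
  simp only [h, PySem.List.pyGetD_natCast, List.getD_cons_succ]

theorem gdLoop4From_split (c : Char) (codes : List Char) (d0 : List Int)
    (dd : List (List Int)) (r : List Int) (n : Nat) :
    gdLoop4From (c :: codes) (d0 :: dd) r ((n : Int) + 1)
      = gdLoop4From codes dd (gdStep4 (c :: codes) (d0 :: dd) r 0) (n : Int) := by
  unfold gdLoop4From
  rw [pyRange_zero_succ_foldl, pyRange_zero_foldl]
  apply PySem.List.foldl_congr_mem
  intro acc k _
  exact gdStep4_shift c codes d0 dd acc k

theorem dishes_split (pre rest : List Char) (m : Char) (hpre : mCodes pre = [])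
    (hm : isMk m = true) (a : Int × Int × Int × Int) :
    dishes (pre ++ m :: rest) a = (m, pre.foldl gdCntStep a) :: dishes rest (0, 0, 0, 0) := by
  induction pre generalizing a with
  | nil => simp [dishes, hm]
  | cons c p ih =>
    have hc : isMk c = false := by
      by_cases h : isMk c
      · simp [mCodes, h] at hpre
      · simpa using h
    have hp : mCodes p = [] := by simpa [mCodes, List.filter_cons, hc] using hpre
    simp [dishes, hc, ih hp]

theorem master_A (N : Nat) : ∀ (cs : List Char) (r : List Int), cs.length ≤ N →
    gdLoop4From (mCodes cs)
        ((gdLoop2 cs (mIdx cs 0) ((mCodes cs).length : Int)).map gdCount) r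
        ((mCodes cs).length : Int)
      = (dishes cs (0, 0, 0, 0)).foldl tallyStep r := by
  induction N with
  | zero =>
    intro cs r hlen
    have : cs = [] := List.length_eq_zero_iff.mp (Nat.le_zero.mp hlen)
    subst this
    simp [mCodes, gdLoop4From, dishes, PySem.List.pyRange]
  | succ N ih =>
    intro cs r hlen
    by_cases h : mCodes cs = []
    · rw [h, dishes_no_marker cs _ h]
      simp [gdLoop4From, PySem.List.pyRange]
    · obtain ⟨pre, m, rest, rfl, hpre, hm⟩ := split_of_marker cs h
      rw [gdLoop2_split pre rest m hpre hm, mCodes_split pre rest m hpre hm]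
      rw [dishes_split pre rest m hpre hm]
      have hn : ((m :: mCodes rest).length : Int) = (((mCodes rest).length : Nat) : Int) + 1 := by
        rw [List.length_cons]; push_cast; ring
      rw [hn, List.map_cons, gdLoop4From_split]
      rw [gdCount_eq_toL pre, gdStep4_head m hm (pre.foldl gdCntStep (0, 0, 0, 0))]
      rw [List.foldl_cons]
      have hrest : rest.length ≤ N := by
        have := hlen
        simp [List.length_append] at this
        omega
      exact ih rest (tallyStep r (m, pre.foldl gdCntStep (0, 0, 0, 0))) hrest

theorem master_B (cs : List Char) : ∀ (a : Int × Int × Int × Int) (r : List Int),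
    (cs.foldl altStep (a, r)).2 = (dishes cs a).foldl tallyStep r := by
  induction cs with
  | nil => intro a r; rfl
  | cons c t ih =>
    intro a r
    rw [List.foldl_cons]
    by_cases hE : c = 'E'
    · subst hE; simp [altStep, dishes, isMk, gdCntStep, ih]
    · by_cases hM : c = 'M'
      · subst hM; simp [altStep, dishes, isMk, gdCntStep, ih]
      · by_cases hF : c = 'F'
        · subst hF; simp [altStep, dishes, isMk, gdCntStep, ih]
        · by_cases hS : c = 'S'
          · subst hS; simp [altStep, dishes, isMk, gdCntStep, ih]
          · by_cases hmk : isMk c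
            · rcases (isMk_iff c).mp hmk with rfl | rfl | rfl <;>
                simp [altStep, altNeed, dishes, isMk, ih, tallyStep, okFor, altSlot, altBump,
                  gdBump, hE, hM, hF, hS] <;>
                (congr 1; split_ifs <;> rfl)
            · have hne : altNeed c = none := by
                have h' := hmk
                simp [isMk] at h'
                obtain ⟨⟨h1, h2⟩, h3⟩ := h'
                simp [altNeed, h1, h2, h3]
              have hcnt : gdCntStep a c = a := by
                simp [gdCntStep, hE, hM, hF, hS]
              simp [altStep, hE, hM, hF, hS, hne, dishes, hmk, hcnt, ih]

-- ===== VERDICT (by name: the statement is the Claim_ definition above) =====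
theorem get_dishes_spec : Claim_equal_get_dishes := by
  intro s _
  unfold Spec_get_dishes
  have hB := master_B s.toList (0, 0, 0, 0) [0, 0, 0, 0]
  have h2 : gdLoop3 (gdLoop2 s.toList (mIdx s.toList 0) ((mCodes s.toList).length : Int))
      ((mCodes s.toList).length : Int)
      = (gdLoop2 s.toList (mIdx s.toList 0) ((mCodes s.toList).length : Int)).map gdCount := by
    set X := gdLoop2 s.toList (mIdx s.toList 0) ((mCodes s.toList).length : Int) with hX
    have h : X.length = (mCodes s.toList).length :=
      gdLoop2_length s.toList (mIdx s.toList 0) (mCodes s.toList).length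
    rw [← h]
    exact gdLoop3_eq_map X
  have hA := master_A s.toList.length s.toList [0, 0, 0, 0] le_rfl
  show gdLoop4 (gdLoop1 s.toList).2.2
      (gdLoop3 (gdLoop2 s.toList (gdLoop1 s.toList).2.1 (gdLoop1 s.toList).1) (gdLoop1 s.toList).1)
      (gdLoop1 s.toList).1
    = (s.toList.foldl altStep ((0, 0, 0, 0), [0, 0, 0, 0])).2
  rw [gdLoop1_eq, hB]
  show gdLoop4From (mCodes s.toList)
      (gdLoop3 (gdLoop2 s.toList (mIdx s.toList 0) ((mCodes s.toList).length : Int))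
        ((mCodes s.toList).length : Int)) [0, 0, 0, 0] ((mCodes s.toList).length : Int)
    = (dishes s.toList (0, 0, 0, 0)).foldl tallyStep [0, 0, 0, 0]
  rw [h2, hA]
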